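-- pv_equiv track=rewrite | github.com/RaiuSuinTawo/TexasSimulator | TexasUtils.py | CheckHighCard
-- ===== SOURCE A (Python) =====
-- def CompareHighCards(Cards1, Cards2):
--     # return True if Cards1 >= Cards2
--     CardValue1 = [Card[1] for Card in Cards1]
--     CardValue2 = [Card[1] for Card in Cards2]
--     if CardValue1 == CardValue2:
--         return 0
--     elif CardValue1 < CardValue2:
--         return -1
--     else:
--         return 1
--
-- def CheckHighCard(AllCards):
--     Winners = [0, ]
--     MaxCardType = AllCards[0]
--     MaxCardType.sort(key=lambda x: x[1], reverse=True)
--     MaxCardType = MaxCardType[:5]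
--     for Player in range(1, len(AllCards)):
--         CurrentPlayerCards = AllCards[Player]
--         CurrentPlayerCards.sort(key=lambda x: x[1], reverse=True)
--         CompareResult = CompareHighCards(MaxCardType, CurrentPlayerCards[:5])
--         if CompareResult < 0:
--             Winners = [Player, ]
--             MaxCardType = CurrentPlayerCards[:5]
--         elif CompareResult == 0:
--             Winners.append(Player)
--     return Winners
-- ===== SOURCE B (Python) =====
-- def CheckHighCard(AllCards):
--     # Two-pass: sort each hand in place (same mutation as the original),
--     # build the value-key of each hand, then argmax + tie filter.
--     keys = []
--     for hand in AllCards: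
--         hand.sort(key=lambda x: x[1], reverse=True)
--         keys.append([c[1] for c in hand[:5]])
--     best = max(keys)
--     return [i for i, k in enumerate(keys) if k == best]
-- ===== Notes on version B (the rewrite author's own statement) =====
-- stated objective: simpler
-- what changed: Replaces the interleaved running-best/reset-or-append tie scan with a two-pass shape: build every hand's sorted 5-card value key, take max(keys), and return the indices whose key equals it.
import Mathlib
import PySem

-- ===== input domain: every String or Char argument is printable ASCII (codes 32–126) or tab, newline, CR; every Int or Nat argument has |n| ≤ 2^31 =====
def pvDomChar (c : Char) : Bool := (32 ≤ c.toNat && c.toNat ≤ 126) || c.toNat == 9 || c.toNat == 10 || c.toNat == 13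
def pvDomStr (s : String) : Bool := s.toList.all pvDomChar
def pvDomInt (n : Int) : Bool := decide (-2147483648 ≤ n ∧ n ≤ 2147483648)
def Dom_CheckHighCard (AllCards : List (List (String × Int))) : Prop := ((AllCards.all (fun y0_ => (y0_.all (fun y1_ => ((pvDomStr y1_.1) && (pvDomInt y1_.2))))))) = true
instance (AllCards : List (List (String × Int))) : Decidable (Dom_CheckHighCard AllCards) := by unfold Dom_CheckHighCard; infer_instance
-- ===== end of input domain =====

-- B replaces A's interleaved running-best/tie scan by a two-pass key-table + argmax + filter (objective: simpler).
-- Both Pythons sort each hand of AllCards in place; the equivalence proved here is about the RETURN value only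
-- (the in-place sort is the same in both).

-- ===== PORT A =====
-- Python list comparison on List Int is Lean's lexicographic '<' / '=' on List Int (exact for int lists).
def CompareHighCards (Cards1 Cards2 : List (String × Int)) : Int :=
  let CardValue1 := Cards1.map (fun Card => Card.2)
  let CardValue2 := Cards2.map (fun Card => Card.2)
  if CardValue1 = CardValue2 then 0
  else if CardValue1 < CardValue2 then -1
  else 1

def CheckHighCard (AllCards : List (List (String × Int))) : List Int :=
  match PySem.List.pyGet? AllCards 0 with
  | none => []   -- AllCards[0] raises IndexError in Python; excluded by Pre_
  | some h0 =>
    let MaxCardType0 := PySem.List.slice (PySem.List.sorted h0 (fun x => x.2) true) none (some 5)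
    ((PySem.List.pyRange 1 (AllCards.length : Int) 1).foldl
      (fun (st : List Int × List (String × Int)) Player =>
        let CurrentPlayerCards := PySem.List.sorted (PySem.List.pyGetD AllCards Player []) (fun x => x.2) true
        let CompareResult := CompareHighCards st.2 (PySem.List.slice CurrentPlayerCards none (some 5))
        if CompareResult < 0 then ([Player], PySem.List.slice CurrentPlayerCards none (some 5))
        else if CompareResult = 0 then (st.1 ++ [Player], st.2)
        else st)
      ([0], MaxCardType0)).1

-- ===== PORT B =====
def CheckHighCard_alt (AllCards : List (List (String × Int))) : List Int :=
  let keys := AllCards.map (fun hand =>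
    (PySem.List.slice (PySem.List.sorted hand (fun x => x.2) true) none (some 5)).map (fun c => c.2))
  match PySem.List.max? keys (fun k => k) with
  | none => []   -- max([]) raises ValueError in Python; excluded by Pre_
  | some best =>
    ((PySem.List.enumerate keys 0).filter (fun p => decide (p.2 = best))).map (fun p => p.1)

-- ===== PRECONDITION & SPEC =====
-- A raises IndexError (and B ValueError) on the empty list; Pre_ excludes exactly that input.
def Pre_CheckHighCard (AllCards : List (List (String × Int))) : Prop := AllCards ≠ []
instance (AllCards : List (List (String × Int))) : Decidable (Pre_CheckHighCard AllCards) := by unfold Pre_CheckHighCard; infer_instance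
def pvWitness_CheckHighCard : (List (List (String × Int))) := ([[("As", 14), ("Kd", 13)]])

def Spec_CheckHighCard (AllCards : List (List (String × Int))) (out : List Int) : Prop := out = CheckHighCard_alt AllCards
instance (AllCards : List (List (String × Int))) (out : List Int) : Decidable (Spec_CheckHighCard AllCards out) := by unfold Spec_CheckHighCard; infer_instance

-- ===== CLAIM (what is proved, stated in full; the proofs are below) =====
def Claim_equal_CheckHighCard : Prop := ∀ (AllCards : List (List (String × Int))), Dom_CheckHighCard AllCards → Pre_CheckHighCard AllCards → Spec_CheckHighCard AllCards (CheckHighCard AllCards)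

-- ===== LEMMAS AND PROOFS =====

-- the value key of a hand: the top-5 card values after the in-place descending sort
def pvKey (hand : List (String × Int)) : List Int :=
  (PySem.List.slice (PySem.List.sorted hand (fun x => x.2) true) none (some 5)).map (fun c => c.2)

-- a fold over range(a, len(xs)) reading xs[j] is a fold over enumerate(xs[a:], a)
theorem pv_foldl_pyRange_enum {α β : Type} (xs : List α) (d : α) (f : β → Int → α → β) :
    ∀ (n a : Nat) (init : β), xs.length - a = n → a ≤ xs.length →
    (PySem.List.pyRange (a : Int) (xs.length : Int) 1).foldl
      (fun st j => f st j (PySem.List.pyGetD xs j d)) init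
    = (PySem.List.enumerate (xs.drop a) (a : Int)).foldl (fun st p => f st p.1 p.2) init := by
  intro n
  induction n with
  | zero =>
    intro a init hn ha
    have hae : a = xs.length := by omega
    subst hae
    rw [PySem.List.pyRange_one_eq_nil (by simp), List.drop_length, PySem.List.enumerate_nil]
    simp
  | succ m ih =>
    intro a init hn ha
    have hlt : a < xs.length := by omega
    rw [PySem.List.pyRange_one_cons (by exact_mod_cast hlt), List.drop_eq_getElem_cons hlt,
      PySem.List.enumerate_cons]
    simp only [List.foldl_cons]
    have hget : PySem.List.pyGetD xs (a : Int) d = xs[a] := by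
      rw [PySem.List.pyGetD_natCast]
      exact List.getD_eq_getElem xs d hlt
    rw [hget]
    have := ih (a + 1) (f init (a : Int) xs[a]) (by omega) (by omega)
    simpa [Int.natCast_add] using this

-- A's index loop over range(1, len) specialised to the enumerate form
theorem pv_loopA_enum (h0 : List (String × Int)) (rest : List (List (String × Int)))
    (init : List Int × List (String × Int)) :
    (PySem.List.pyRange 1 (((h0 :: rest).length : Nat) : Int) 1).foldl
      (fun (st : List Int × List (String × Int)) j =>
        let cur := PySem.List.sorted (PySem.List.pyGetD (h0 :: rest) j []) (fun x => x.2) true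
        let r := CompareHighCards st.2 (PySem.List.slice cur none (some 5))
        if r < 0 then ([j], PySem.List.slice cur none (some 5))
        else if r = 0 then (st.1 ++ [j], st.2)
        else st) init
    = (PySem.List.enumerate rest 1).foldl
      (fun (st : List Int × List (String × Int)) p =>
        let cur := PySem.List.sorted p.2 (fun x => x.2) true
        let r := CompareHighCards st.2 (PySem.List.slice cur none (some 5))
        if r < 0 then ([p.1], PySem.List.slice cur none (some 5))
        else if r = 0 then (st.1 ++ [p.1], st.2)
        else st) init := by
  have H := pv_foldl_pyRange_enum (h0 :: rest) []
    (fun (st : List Int × List (String × Int)) j hand =>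
      let cur := PySem.List.sorted hand (fun x => x.2) true
      let r := CompareHighCards st.2 (PySem.List.slice cur none (some 5))
      if r < 0 then ([j], PySem.List.slice cur none (some 5))
      else if r = 0 then (st.1 ++ [j], st.2)
      else st)
    rest.length 1 init (by simp) (by simp)
  simpa using H

-- max(keys) on a cons is the running max fold (instances as elaborated in the port)
theorem pv_max?_cons (x : List Int) (t : List (List Int)) :
    PySem.List.max? (x :: t) (fun k => k) = some (t.foldl max x) := by
  have h := PySem.List.max?_id_cons x t
  convert h using 2

-- the invariant of A's loop: winners = (kept prefix winners) ++ indices whose key equals the running max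
theorem pv_foldA_spec (hands : List (List (String × Int))) :
    ∀ (s : Int) (w : List Int) (M : List (String × Int)),
    (((PySem.List.enumerate hands s).foldl
        (fun (st : List Int × List (String × Int)) p =>
          let cur := PySem.List.sorted p.2 (fun x => x.2) true
          let r := CompareHighCards st.2 (PySem.List.slice cur none (some 5))
          if r < 0 then ([p.1], PySem.List.slice cur none (some 5))
          else if r = 0 then (st.1 ++ [p.1], st.2)
          else st)
        (w, M)).1
      = (if ((hands.map pvKey).foldl (fun acc k => max acc k) (M.map (fun c => c.2)))
            = M.map (fun c => c.2) then w else []) ++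
        ((PySem.List.enumerate (hands.map pvKey) s).filter
          (fun p => decide (p.2 = (hands.map pvKey).foldl (fun acc k => max acc k) (M.map (fun c => c.2))))).map (fun p => p.1))
    ∧ (((PySem.List.enumerate hands s).foldl
        (fun (st : List Int × List (String × Int)) p =>
          let cur := PySem.List.sorted p.2 (fun x => x.2) true
          let r := CompareHighCards st.2 (PySem.List.slice cur none (some 5))
          if r < 0 then ([p.1], PySem.List.slice cur none (some 5))
          else if r = 0 then (st.1 ++ [p.1], st.2)
          else st)
        (w, M)).2.map (fun c => c.2)
      = (hands.map pvKey).foldl (fun acc k => max acc k) (M.map (fun c => c.2))) := by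
  induction hands with
  | nil =>
    intro s w M
    simp [PySem.List.enumerate_nil]
  | cons h t ih =>
    intro s w M
    rw [PySem.List.enumerate_cons]
    simp only [List.map_cons, List.foldl_cons, PySem.List.enumerate_cons, List.filter_cons]
    set K := M.map (fun c => c.2) with hK
    have hkey : (PySem.List.slice (PySem.List.sorted h (fun x => x.2) true) none (some 5)).map (fun c => c.2) = pvKey h := rfl
    -- analyse the comparison
    rcases lt_trichotomy K (pvKey h) with hc | hc | hc
    · -- K < pvKey h : CompareResult = -1, reset
      have hr : CompareHighCards M (PySem.List.slice (PySem.List.sorted h (fun x => x.2) true) none (some 5)) = -1 := by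
        simp only [CompareHighCards, hkey, ← hK]
        rw [if_neg (by exact ne_of_lt hc), if_pos hc]
      rw [hr]
      norm_num
      obtain ⟨ih1, ih2⟩ := ih (s + 1) [s] (PySem.List.slice (PySem.List.sorted h (fun x => x.2) true) none (some 5))
      rw [hkey] at ih1 ih2
      have hmax : max K (pvKey h) = pvKey h := max_eq_right hc.le
      simp only [hmax]
      constructor
      · rw [ih1]
        set best := (t.map pvKey).foldl (fun acc k => max acc k) (pvKey h) with hb
        have hbest_ge : pvKey h ≤ best := (PySem.List.le_foldl_max (t.map pvKey) (pvKey h)).1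
        have hKne : ¬ best = K := fun he => absurd hc (not_lt_of_ge (he ▸ hbest_ge))
        rw [if_neg hKne]
        by_cases hh : pvKey h = best
        · simp [hh]
        · simp [hh, Ne.symm hh]
      · exact ih2
    · -- K = pvKey h : CompareResult = 0, append
      have hr : CompareHighCards M (PySem.List.slice (PySem.List.sorted h (fun x => x.2) true) none (some 5)) = 0 := by
        simp only [CompareHighCards, hkey, ← hK]
        rw [if_pos hc]
      rw [hr]
      norm_num
      obtain ⟨ih1, ih2⟩ := ih (s + 1) (w ++ [s]) M
      rw [← hK] at ih1 ih2
      have hmax : max K (pvKey h) = K := by rw [← hc]; exact max_self K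
      simp only [hmax]
      constructor
      · rw [ih1]
        by_cases hb : (t.map pvKey).foldl (fun acc k => max acc k) K = K
        · simp [hb, ← hc]
        · have hb' : ¬ (t.map pvKey).foldl (fun acc k => max acc k) K = pvKey h := by
            rw [← hc]; exact hb
          rw [if_neg hb, List.nil_append, if_neg (fun he => hb' (Eq.symm he)), if_neg hb,
            List.nil_append]
      · exact ih2
    · -- pvKey h < K : CompareResult = 1, skip
      have hr : CompareHighCards M (PySem.List.slice (PySem.List.sorted h (fun x => x.2) true) none (some 5)) = 1 := by
        simp only [CompareHighCards, hkey, ← hK]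
        rw [if_neg (by exact (ne_of_lt hc).symm), if_neg (by exact not_lt_of_gt hc)]
      rw [hr]
      norm_num
      obtain ⟨ih1, ih2⟩ := ih (s + 1) w M
      rw [← hK] at ih1 ih2
      have hmax : max K (pvKey h) = K := max_eq_left hc.le
      simp only [hmax]
      constructor
      · rw [ih1]
        set best := (t.map pvKey).foldl (fun acc k => max acc k) K with hb
        have hbest_ge : K ≤ best := (PySem.List.le_foldl_max (t.map pvKey) K).1
        have hne : ¬ pvKey h = best := fun he => absurd (lt_of_lt_of_le hc hbest_ge) (by rw [he]; exact lt_irrefl _)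
        simp [hne]
      · exact ih2

-- ===== VERDICT (by name: the statement is the Claim_ definition above) =====
theorem CheckHighCard_spec : Claim_equal_CheckHighCard := by
  intro AllCards _hdom hpre
  unfold Spec_CheckHighCard
  obtain ⟨h0, rest, rfl⟩ : ∃ h0 rest, AllCards = h0 :: rest :=
    match AllCards, hpre with
    | x :: xs, _ => ⟨x, xs, rfl⟩
  unfold CheckHighCard CheckHighCard_alt
  have hget : PySem.List.pyGet? (h0 :: rest) 0 = some h0 := by
    simp [PySem.List.pyGet?, PySem.List.pyIdx?]
  simp only [hget, List.map_cons]
  rw [pv_loopA_enum]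
  obtain ⟨hA, _⟩ := pv_foldA_spec rest 1 [0]
    (PySem.List.slice (PySem.List.sorted h0 (fun x => x.2) true) none (some 5))
  rw [hA, pv_max?_cons]
  have hhk : (PySem.List.slice (PySem.List.sorted h0 (fun x => x.2) true) none (some 5)).map (fun x => x.2) = pvKey h0 := rfl
  have hmapk : rest.map (fun hand =>
      (PySem.List.slice (PySem.List.sorted hand (fun x => x.2) true) none (some 5)).map (fun x => x.2)) = rest.map pvKey := rfl
  rw [hhk, hmapk]
  have hfold : (rest.map pvKey).foldl max (pvKey h0)
      = (rest.map pvKey).foldl (fun acc k => max acc k) (pvKey h0) := rfl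
  simp only [hfold]
  set best := (rest.map pvKey).foldl (fun acc k => max acc k) (pvKey h0) with hb
  rw [PySem.List.enumerate_cons, List.filter_cons]
  by_cases h0b : pvKey h0 = best
  · simp [h0b]
  · simp [h0b, Ne.symm h0b]
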